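-- pv_equiv track=rewrite | github.com/terror/solutions | binarysearch/removing-triple-successive-duplicates.py | solve
-- ===== SOURCE A (Python) =====
-- def solve(s):
--   i = 0; ans = 0
--   while i < len(s) - 1:
--     j = i + 1
--     while j < len(s) and s[j] == s[i]:
--       j += 1
--     ans += (j - i) // 3
--     i = j
--   return ans
-- ===== SOURCE B (Python) =====
-- def solve(s):
--   ans = 0; run = 0; prev = None
--   for ch in s:
--     run = run + 1 if ch == prev else 1
--     if run == 3:
--       ans += 1
--       run = 0
--     prev = ch
--   return ans
-- ===== Notes on version B (the rewrite author's own statement) =====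
-- stated objective: faster
-- what changed: Replaced the nested index loops (inner scan finding each run's end, then adding run_length//3) by one flat pass keeping a single consecutive-run counter that adds 1 and resets whenever it reaches 3; per-character work drops to constant with no index arithmetic or re-reads.
import Mathlib
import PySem

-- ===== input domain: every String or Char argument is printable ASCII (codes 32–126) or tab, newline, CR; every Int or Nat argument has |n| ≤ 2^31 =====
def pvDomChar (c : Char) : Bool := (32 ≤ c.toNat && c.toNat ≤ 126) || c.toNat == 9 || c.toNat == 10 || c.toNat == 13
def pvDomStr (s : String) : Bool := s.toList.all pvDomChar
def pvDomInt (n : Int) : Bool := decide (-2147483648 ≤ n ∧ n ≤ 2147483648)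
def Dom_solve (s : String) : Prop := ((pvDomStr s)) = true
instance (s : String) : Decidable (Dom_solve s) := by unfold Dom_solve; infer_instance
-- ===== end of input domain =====

-- B replaces A's nested run-scanning loops by one flat pass with a run counter that resets at 3 (alternative decomposition, same O(n) cost).

-- ===== PORT A =====
-- inner while loop: advance j while j < len(s) and s[j] == s[i]
-- (index guarded in range, so getD's default is never read; all quantities
-- are nonnegative, so Python's `//` coincides with Nat division)
def innerA (l : List Char) (c : Char) (j : Nat) : Nat :=
  if h : j < l.length ∧ (l.getD j ' ' == c) = true then innerA l c (j + 1) else j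
termination_by l.length - j
decreasing_by omega

theorem innerA_ge (l : List Char) (c : Char) (j : Nat) : j ≤ innerA l c j := by
  fun_induction innerA l c j with
  | case1 j h ih => omega
  | case2 j h => omega

-- outer while loop: `i < len(s) - 1` ⟺ `i + 1 < len(s)` on ints (exact also for the empty string)
def outerA (l : List Char) (i ans : Nat) : Nat :=
  if h : i + 1 < l.length then
    let j := innerA l (l.getD i ' ') (i + 1)
    outerA l j (ans + (j - i) / 3)
  else ans
termination_by l.length - i
decreasing_by
  have := innerA_ge l (l.getD i ' ') (i + 1)
  omega

def solve (s : String) : Int := (outerA s.toList 0 0 : Int)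

-- ===== PORT B =====
-- one fold step: bump the run counter (reset to 1 on a new char), count and reset at 3
def bStep (st : Option Char × Nat × Nat) (ch : Char) : Option Char × Nat × Nat :=
  let run' := if (some ch == st.1) then st.2.1 + 1 else 1
  if run' == 3 then (some ch, 0, st.2.2 + 1) else (some ch, run', st.2.2)

def solve_alt (s : String) : Int := ((s.toList.foldl bStep (none, 0, 0)).2.2 : Int)

-- ===== PRECONDITION & SPEC =====
def Spec_solve (s : String) (out : Int) : Prop := out = solve_alt s
instance (s : String) (out : Int) : Decidable (Spec_solve s out) := by unfold Spec_solve; infer_instance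

-- ===== CLAIM (what is proved, stated in full; the proofs are below) =====
def Claim_equal_solve : Prop := ∀ (s : String), Dom_solve s → Spec_solve s (solve s)

-- ===== LEMMAS AND PROOFS =====

-- length of the leading run of `c` in `l`
def lead (c : Char) (l : List Char) : Nat := (l.takeWhile (fun x => x == c)).length

theorem lead_cons (c x : Char) (t : List Char) :
    lead c (x :: t) = if (x == c) = true then lead c t + 1 else 0 := by
  simp only [lead, List.takeWhile_cons]
  by_cases hx : (x == c) = true
  · rw [if_pos hx, if_pos hx]; simp
  · rw [if_neg hx, if_neg hx]; simp

-- reference function: sum of (run length)/3 over the maximal runs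
def G : List Char → Nat
  | [] => 0
  | c :: t => (lead c t + 1) / 3 + G (t.drop (lead c t))
termination_by l => l.length
decreasing_by simp

theorem G_nil : G [] = 0 := by rw [G.eq_1]

theorem G_cons (c : Char) (t : List Char) :
    G (c :: t) = (lead c t + 1) / 3 + G (t.drop (lead c t)) := by rw [G.eq_2]

theorem G_short (l : List Char) (h : l.length ≤ 1) : G l = 0 := by
  match l, h with
  | [], _ => exact G_nil
  | [c], _ => simp [G_cons, G_nil, lead]

theorem drop_lead_head (c : Char) (l : List Char) :
    ∀ h, (l.drop (lead c l)).head? = some h → (h == c) = false := by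
  induction l with
  | nil => simp [lead]
  | cons x t ih =>
    intro h hh
    rw [lead_cons] at hh
    by_cases hx : (x == c) = true
    · rw [if_pos hx] at hh
      exact ih h (by simpa using hh)
    · rw [if_neg hx] at hh
      simp at hh
      rcases hh with ⟨rfl, _⟩
      simpa using hx

theorem innerA_eq (l : List Char) (c : Char) (j : Nat) :
    innerA l c j = j + lead c (l.drop j) := by
  fun_induction innerA l c j with
  | case1 j h ih =>
    obtain ⟨hj, hc⟩ := h
    rw [ih, List.drop_eq_getElem_cons hj, lead_cons]
    rw [List.getD_eq_getElem l ' ' hj] at hc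
    rw [if_pos hc]
    omega
  | case2 j h =>
    by_cases hj : j < l.length
    · have hc : (l.getD j ' ' == c) = false := by
        rcases Bool.eq_false_or_eq_true (l.getD j ' ' == c) with h' | h'
        · exact absurd ⟨hj, h'⟩ h
        · exact h'
      rw [List.getD_eq_getElem l ' ' hj] at hc
      rw [List.drop_eq_getElem_cons hj, lead_cons, if_neg (by simp [hc]), Nat.add_zero]
    · rw [List.drop_eq_nil_iff.mpr (by omega)]
      simp [lead]

theorem outerA_eq (l : List Char) (i ans : Nat) :
    outerA l i ans = ans + G (l.drop i) := by
  fun_induction outerA l i ans with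
  | case1 i ans h j ih =>
    have hi : i < l.length := by omega
    set k := lead (l.getD i ' ') (l.drop (i + 1)) with hk
    have hj2 : j = i + 1 + k := innerA_eq _ _ _
    rw [ih, hj2]
    have hdrop : l.drop i = l[i] :: l.drop (i + 1) := List.drop_eq_getElem_cons hi
    have hgd : l.getD i ' ' = l[i] := List.getD_eq_getElem l ' ' hi
    rw [hdrop, G_cons, ← hgd, ← hk]
    have h1 : i + 1 + k - i = k + 1 := by omega
    have h2 : (l.drop (i + 1)).drop k = l.drop (i + 1 + k) := by
      rw [List.drop_drop]
    rw [h1, h2]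
    omega
  | case2 i ans h =>
    rw [G_short]
    · omega
    · simp; omega

theorem runB (l : List Char) (c : Char) :
    ∀ r a, r < 3 →
      l.foldl bStep (some c, r, a)
        = (l.drop (lead c l)).foldl bStep (some c, (r + lead c l) % 3, a + (r + lead c l) / 3) := by
  induction l with
  | nil =>
    intro r a hr
    simp [lead, Nat.mod_eq_of_lt hr, Nat.div_eq_of_lt hr]
  | cons x t ih =>
    intro r a hr
    by_cases hx : (x == c) = true
    · have hxc : x = c := by simpa using hx
      subst hxc
      rw [lead_cons, if_pos (by simp)]
      by_cases hr2 : r = 2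
      · subst hr2
        have hstep : bStep (some x, 2, a) x = (some x, 0, a + 1) := by
          simp [bStep]
        rw [List.foldl_cons, hstep, ih 0 (a + 1) (by omega)]
        have h1 : (2 + (lead x t + 1)) % 3 = (0 + lead x t) % 3 := by omega
        have h2 : a + 1 + (0 + lead x t) / 3 = a + (2 + (lead x t + 1)) / 3 := by omega
        rw [h1, h2]
        simp
      · have hstep : bStep (some x, r, a) x = (some x, r + 1, a) := by
          simp [bStep]
          omega
        rw [List.foldl_cons, hstep, ih (r + 1) a (by omega)]
        have h1 : (r + 1 + lead x t) = (r + (lead x t + 1)) := by omega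
        rw [h1]
        simp
    · rw [lead_cons, if_neg hx]
      simp [Nat.mod_eq_of_lt hr, Nat.div_eq_of_lt hr]

theorem mainB : ∀ (n : Nat) (l : List Char), l.length ≤ n →
    ∀ (p : Option Char) (r a : Nat),
      (∀ h, l.head? = some h → (some h == p) = false) →
      (l.foldl bStep (p, r, a)).2.2 = a + G l := by
  intro n
  induction n with
  | zero =>
    intro l hl p r a _
    have : l = [] := List.eq_nil_of_length_eq_zero (by omega)
    subst this
    simp [G]
  | succ n ih =>
    intro l hl p r a hfresh
    match l with
    | [] => simp [G]
    | x :: t =>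
      have hx : (some x == p) = false := hfresh x rfl
      have hstep : bStep (p, r, a) x = (some x, 1, a) := by
        simp [bStep, hx]
      rw [List.foldl_cons, hstep, runB t x 1 a (by omega)]
      have hlen : (t.drop (lead x t)).length ≤ n := by
        have := List.length_drop (l := t) (i := lead x t)
        simp at hl ⊢
        omega
      rw [ih (t.drop (lead x t)) hlen (some x) _ _ ?_]
      · show a + (1 + lead x t) / 3 + G (t.drop (lead x t)) = a + G (x :: t)
        rw [G]
        omega
      · intro h hh
        have := drop_lead_head x t h hh
        simpa using this

-- ===== VERDICT (by name: the statement is the Claim_ definition above) =====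
theorem solve_spec : Claim_equal_solve := by
  intro s _
  unfold Spec_solve solve solve_alt
  congr 1
  rw [outerA_eq, List.drop_zero]
  rw [mainB s.toList.length s.toList le_rfl none 0 0 (by intro h hh; rfl)]
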